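-- pv_equiv track=rewrite | github.com/vikrantsingh29/NASKG | test.py | simplify_tech_list
-- ===== SOURCE A (Python) =====
-- def simplify_tech_list(tech_list):
--     simplified_list = {}
--     sorted_urls = sorted(tech_list.keys(), key=len)
--
--     for url in sorted_urls:
--         tech_set = set(tech_list[url])
--
--         if 'pdfs' in url:
--             simplified_list[url] = ['PDF generator']
--         else:
--             # Remove technologies that are already used by an ancestor
--             for ancestor in sorted_urls:
--                 if ancestor == url:
--                     break
--                 if url.startswith(ancestor):
--                     ancestor_tech = set(tech_list[ancestor])
--                     tech_set -= ancestor_tech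
--
--             simplified_list[url] = sorted(tech_set)
--
--     return simplified_list
-- ===== SOURCE B (Python) =====
-- def simplify_tech_list(tech_list):
--     # One pass per URL over its own character prefixes (dict lookups) instead of
--     # scanning all other URLs; same output dict, in length-sorted key order.
--     simplified = {}
--     for url in sorted(tech_list, key=len):
--         if 'pdfs' in url:
--             simplified[url] = ['PDF generator']
--         else:
--             inherited = set()
--             for i in range(len(url)):
--                 prefix = url[:i]
--                 if prefix in tech_list:
--                     inherited.update(tech_list[prefix])
--             simplified[url] = sorted(set(tech_list[url]) - inherited)
--     return simplified
-- ===== Notes on version B (the rewrite author's own statement) =====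
-- stated objective: faster
-- what changed: A's inner scan over the whole length-sorted URL list for each URL is replaced by a loop over that URL's own character prefixes with dict lookups, so ancestors are found in O(L) lookups instead of an O(n) scan per URL.
import Mathlib
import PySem

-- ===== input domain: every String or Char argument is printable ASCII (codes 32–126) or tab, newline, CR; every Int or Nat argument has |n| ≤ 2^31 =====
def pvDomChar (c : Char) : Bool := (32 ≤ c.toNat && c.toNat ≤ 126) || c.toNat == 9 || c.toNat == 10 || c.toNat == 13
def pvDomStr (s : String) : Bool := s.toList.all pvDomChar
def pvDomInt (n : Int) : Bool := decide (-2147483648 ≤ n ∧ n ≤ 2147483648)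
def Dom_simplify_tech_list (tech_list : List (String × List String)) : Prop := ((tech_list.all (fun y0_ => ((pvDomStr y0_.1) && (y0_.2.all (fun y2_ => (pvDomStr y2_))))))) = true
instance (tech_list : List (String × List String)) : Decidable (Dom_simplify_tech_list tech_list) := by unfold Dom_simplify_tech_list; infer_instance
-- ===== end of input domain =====

-- B replaces A's inner scan over all urls by a loop over the url's own prefixes with
-- dict lookups (objective: faster, asymptotic). Equivalence is about the return value.
-- In both ports 'sorted(tech_set)' sorts with key (fun x => x.toList): Python's str '<'
-- IS Lean's '<' on s.toList (PYSEM), stated this way because String's own LT instance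
-- does not reduce in the kernel.

-- ===== PORT A =====
def simplify_tech_list (tech_list : List (String × List String)) : List (String × List String) :=
  let d := PySem.Dict.mk tech_list
  let sorted_urls := PySem.List.sorted d.keys (fun u => PySem.Str.len u) false
  (sorted_urls.foldl (fun simplified url =>
    if PySem.Str.isIn "pdfs" url then
      simplified.insert url ["PDF generator"]
    else
      -- for ancestor in sorted_urls: break at ancestor == url  →  takeWhile (· != url)
      let tech_set : PySem.Set String := PySem.Set.ofList (d.getD url [])
      let tech_set := (sorted_urls.takeWhile (fun a => a != url)).foldl
        (fun s anc => if PySem.Str.startswith url anc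
          then PySem.Set.diff s (PySem.Set.ofList (d.getD anc []))
          else s) tech_set
      simplified.insert url (PySem.List.sorted tech_set (fun x => x.toList) false))
    PySem.Dict.empty).items

-- ===== PORT B =====
-- loop body of B's prefix loop ('if prefix in tech_list: inherited.update(tech_list[prefix])')
def pvStepB (d : PySem.Dict String (List String)) (url : String) (s : PySem.Set String) (i : Int) : PySem.Set String :=
  match d.get? (PySem.Str.slice url none (some i)) with
  | some ts => PySem.Set.update s ts
  | none => s

def simplify_tech_list_alt (tech_list : List (String × List String)) : List (String × List String) :=
  let d := PySem.Dict.mk tech_list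
  let sorted_urls := PySem.List.sorted d.keys (fun u => PySem.Str.len u) false
  (sorted_urls.foldl (fun simplified url =>
    if PySem.Str.isIn "pdfs" url then
      simplified.insert url ["PDF generator"]
    else
      let inherited := (PySem.List.pyRange 0 (PySem.Str.len url) 1).foldl
        (pvStepB d url) PySem.Set.empty
      simplified.insert url
        (PySem.List.sorted (PySem.Set.diff (PySem.Set.ofList (d.getD url [])) inherited)
          (fun x => x.toList) false))
    PySem.Dict.empty).items

-- ===== PRECONDITION & SPEC =====
def Spec_simplify_tech_list (tech_list : List (String × List String)) (out : List (String × List String)) : Prop := out = simplify_tech_list_alt tech_list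
instance (tech_list : List (String × List String)) (out : List (String × List String)) : Decidable (Spec_simplify_tech_list tech_list out) := by unfold Spec_simplify_tech_list; infer_instance

-- ===== CLAIM (what is proved, stated in full; the proofs are below) =====
def Claim_equal_simplify_tech_list : Prop := ∀ (tech_list : List (String × List String)), Dom_simplify_tech_list tech_list → Spec_simplify_tech_list tech_list (simplify_tech_list tech_list)

-- ===== LEMMAS AND PROOFS =====

-- PySem.List.sorted with the string key (fun x => x.toList) respects permutations
theorem pv_sorted_congr_perm (xs ys : List String) (h : xs.Perm ys) :
    PySem.List.sorted xs (fun x => x.toList) false = PySem.List.sorted ys (fun x => x.toList) false := by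
  have hinst : @PySem.List.sorted String (List Char) List.instLT (fun a b => a.decidableLT b)
      = @PySem.List.sorted String (List Char) List.instLinearOrder.toLT LinearOrder.toDecidableLT := by
    congr 1
    · funext a b; exact Subsingleton.elim _ _
  rw [hinst]
  exact PySem.List.sorted_eq_sorted_of_perm _ _ _ (fun a b hh => String.toList_inj.mp hh) h

-- membership in A's subtract-if loop
theorem pv_mem_foldl_diff {α β : Type} [BEq α] [LawfulBEq α]
    (l : List β) (P : β → Bool) (g : β → PySem.Set α) (s0 : PySem.Set α) (t : α) :
    (t ∈ l.foldl (fun s a => if P a then PySem.Set.diff s (g a) else s) s0) ↔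
      t ∈ s0 ∧ ∀ a ∈ l, P a = true → t ∉ g a := by
  induction l generalizing s0 with
  | nil => simp
  | cons a l ih =>
    by_cases h : P a = true
    · simp [h, ih, PySem.Set.mem_diff, and_assoc]
    · simp [h, ih]

theorem pv_nodup_foldl_diff {α β : Type} [BEq α] [LawfulBEq α]
    (l : List β) (P : β → Bool) (g : β → PySem.Set α) (s0 : PySem.Set α) (h : s0.Nodup) :
    (l.foldl (fun s a => if P a then PySem.Set.diff s (g a) else s) s0).Nodup := by
  induction l generalizing s0 with
  | nil => exact h
  | cons a l ih =>
    by_cases hp : P a = true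
    · simp only [List.foldl_cons, hp, if_true]; exact ih _ (PySem.Set.nodup_diff _ _ h)
    · simp only [List.foldl_cons, hp]; exact ih _ h

-- membership in B's union loop
theorem pv_mem_foldl_update (d : PySem.Dict String (List String)) (url : String)
    (l : List Int) (s0 : PySem.Set String) (t : String) :
    (t ∈ l.foldl (pvStepB d url) s0) ↔
      t ∈ s0 ∨ ∃ i ∈ l, ∃ ts, d.get? (PySem.Str.slice url none (some i)) = some ts ∧ t ∈ ts := by
  induction l generalizing s0 with
  | nil => simp
  | cons a l ih =>
    rw [List.foldl_cons]
    cases hF : d.get? (PySem.Str.slice url none (some a)) with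
    | some ts =>
      rw [show pvStepB d url s0 a = PySem.Set.update s0 ts by unfold pvStepB; rw [hF]]
      simp [ih, PySem.Set.mem_update, hF]; tauto
    | none =>
      rw [show pvStepB d url s0 a = s0 by unfold pvStepB; rw [hF]]
      simp [ih, hF]

-- in a length-sorted list, any member strictly shorter than url sits before the first url
theorem pv_mem_takeWhile_of_lt (l : List String) (url k : String)
    (hp : l.Pairwise (fun a b => PySem.Str.len a ≤ PySem.Str.len b))
    (hk : k ∈ l) (hlt : PySem.Str.len k < PySem.Str.len url) :
    k ∈ l.takeWhile (fun a => a != url) := by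
  induction l with
  | nil => simp at hk
  | cons h tl ih =>
    rcases List.pairwise_cons.mp hp with ⟨hp1, hp2⟩
    rcases List.mem_cons.mp hk with rfl | hk'
    · have hne : k ≠ url := fun e => by subst e; exact absurd hlt (lt_irrefl _)
      simp [hne]
    · have hne : h ≠ url := by
        intro e; subst e
        exact absurd (lt_of_le_of_lt (hp1 k hk') hlt) (lt_irrefl _)
      simpa [List.takeWhile_cons, hne] using Or.inr (ih hp2 hk')

-- the subtracted key sets coincide: ancestors before url in the length-sorted key list
-- that url starts with  =  proper prefixes of url that are keys of d
theorem pv_ancestor_iff (d : PySem.Dict String (List String)) (url : String) (t : String) :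
    (∀ anc ∈ (PySem.List.sorted d.keys (fun u => PySem.Str.len u) false).takeWhile (fun a => a != url),
        PySem.Str.startswith url anc = true → t ∉ PySem.Set.ofList (d.getD anc [])) ↔
      ¬ ∃ i ∈ PySem.List.pyRange 0 (PySem.Str.len url) 1,
          ∃ ts, d.get? (PySem.Str.slice url none (some i)) = some ts ∧ t ∈ ts := by
  constructor
  · rintro H ⟨i, hi, ts, hget, ht⟩
    rcases PySem.List.mem_pyRange_one.mp hi with ⟨hi0, hilt⟩
    rw [PySem.Str.len_eq] at hilt
    set p := PySem.Str.slice url none (some i) with hp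
    have hpl : p.toList = url.toList.take i.toNat := by
      rw [hp, PySem.Str.toList_slice, PySem.Chars.slice_eq_listSlice, PySem.List.slice_to _ hi0]
    have hlen : PySem.Str.len p < PySem.Str.len url := by
      rw [PySem.Str.len_eq, PySem.Str.len_eq, hpl, List.length_take]
      omega
    have hpre : p.toList <+: url.toList := hpl ▸ List.take_prefix _ _
    have hsw : PySem.Str.startswith url p = true := by
      rw [PySem.Str.startswith_eq, PySem.Chars.startswith_iff]; exact hpre
    have hkeys : p ∈ d.keys := by
      by_contra hm
      rw [← PySem.Dict.get?_eq_none_iff_not_mem_keys] at hm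
      rw [hm] at hget; simp at hget
    have hmem : p ∈ PySem.List.sorted d.keys (fun u => PySem.Str.len u) false :=
      (PySem.List.mem_sorted _ _ _ _).mpr hkeys
    have htw := pv_mem_takeWhile_of_lt _ url p
      (PySem.List.sorted_pairwise d.keys (fun u => PySem.Str.len u)) hmem hlen
    refine H p htw hsw ?_
    rw [PySem.Set.mem_ofList, PySem.Dict.getD_eq_get?_getD, hget]
    exact ht
  · intro H anc hanc hsw hmem
    apply H
    have hancmem : anc ∈ PySem.List.sorted d.keys (fun u => PySem.Str.len u) false :=
      (List.takeWhile_sublist _).subset hanc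
    have hne : anc ≠ url := by simpa using List.mem_takeWhile_imp hanc
    have hkeys : anc ∈ d.keys := (PySem.List.mem_sorted _ _ _ _).mp hancmem
    have hpre : anc.toList <+: url.toList := by
      rw [PySem.Str.startswith_eq, PySem.Chars.startswith_iff] at hsw; exact hsw
    have hlt : anc.toList.length < url.toList.length := by
      rcases lt_or_eq_of_le hpre.length_le with h | h
      · exact h
      · exact absurd (String.toList_inj.mp (hpre.eq_of_length h)) hne
    refine ⟨(anc.toList.length : Int), ?_, ?_⟩
    · rw [PySem.List.mem_pyRange_one, PySem.Str.len_eq]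
      constructor <;> omega
    · have hsl : PySem.Str.slice url none (some (anc.toList.length : Int)) = anc := by
        rw [← String.toList_inj, PySem.Str.toList_slice, PySem.Chars.slice_eq_listSlice,
          PySem.List.slice_to _ (by omega)]
        simp only [Int.toNat_natCast]
        exact (List.prefix_iff_eq_take.mp hpre).symm
      rw [hsl]
      have hns : d.get? anc ≠ none := by
        intro hnone
        exact (PySem.Dict.get?_eq_none_iff_not_mem_keys d anc).mp hnone hkeys
      rcases Option.ne_none_iff_exists'.mp hns with ⟨ts, hts⟩
      refine ⟨ts, hts, ?_⟩
      rw [PySem.Set.mem_ofList, PySem.Dict.getD_eq_get?_getD, hts] at hmem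
      exact hmem

-- per-url value of the non-pdfs branch is the same in both ports
theorem pv_branch_eq (d : PySem.Dict String (List String)) (url : String) :
    PySem.List.sorted
      (((PySem.List.sorted d.keys (fun u => PySem.Str.len u) false).takeWhile (fun a => a != url)).foldl
        (fun s anc => if PySem.Str.startswith url anc
          then PySem.Set.diff s (PySem.Set.ofList (d.getD anc []))
          else s) (PySem.Set.ofList (d.getD url []))) (fun x => x.toList) false
    = PySem.List.sorted
        (PySem.Set.diff (PySem.Set.ofList (d.getD url []))
          ((PySem.List.pyRange 0 (PySem.Str.len url) 1).foldl
            (pvStepB d url) PySem.Set.empty)) (fun x => x.toList) false := by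
  apply pv_sorted_congr_perm
  rw [List.perm_ext_iff_of_nodup]
  · intro t
    rw [pv_mem_foldl_diff, PySem.Set.mem_diff, pv_mem_foldl_update]
    have hiff := pv_ancestor_iff d url t
    constructor
    · rintro ⟨h1, h2⟩
      refine ⟨h1, ?_⟩
      intro hmem
      rcases hmem with hmem | hmem
      · simp [PySem.Set.empty] at hmem
      · exact (hiff.mp h2) hmem
    · rintro ⟨h1, h2⟩
      refine ⟨h1, hiff.mpr ?_⟩
      intro hx; exact h2 (Or.inr hx)
  · exact pv_nodup_foldl_diff _ _ _ _ (PySem.Set.nodup_ofList _)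
  · exact PySem.Set.nodup_diff _ _ (PySem.Set.nodup_ofList _)

-- ===== VERDICT (by name: the statement is the Claim_ definition above) =====
theorem simplify_tech_list_spec : Claim_equal_simplify_tech_list := by
  intro tech_list _
  unfold Spec_simplify_tech_list simplify_tech_list simplify_tech_list_alt
  refine congrArg PySem.Dict.items (PySem.List.foldl_congr_mem _ _ _ _ ?_)
  intro acc url _
  by_cases hpdf : PySem.Str.isIn "pdfs" url = true
  · rw [if_pos hpdf, if_pos hpdf]
  · rw [if_neg hpdf, if_neg hpdf]
    exact congrArg (acc.insert url) (pv_branch_eq (PySem.Dict.mk tech_list) url)
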